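-- pv_equiv track=rewrite | github.com/irishdevops/master_VIU_AI | 0.2_python_programming/Activity1/Díaz_Ireland_Práctica 1_HRRMNTSDPRGRMCN.py | contar_hidrogenos
-- ===== SOURCE A (Python) =====
-- def contar_hidrogenos(s:str)-> float:
--     contador_H = 0
--     contador = -1
--     ##valid_numbers = list("23456789")## Not used in the end
--     for char in s:
--         contador = contador + 1
--         if contador+1 == len(s):
--             contador=contador-1
--         if char == "H" and s[contador+1].isupper():
--             contador_H = contador_H + 1
--         elif char == "H" and s[contador+1].isdigit():
--             contador_H = contador_H + int(s[contador+1])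
--
--     return contador_H
-- ===== SOURCE B (Python) =====
-- def contar_hidrogenos(s: str) -> float:
--     total = 0
--     for piece in s.split('H')[1:]:
--         if piece == '':
--             total += 1          # next char was another 'H', or end of string
--         elif piece[0].isupper():
--             total += 1
--         elif piece[0].isdigit():
--             total += int(piece[0])
--     return total
-- ===== Notes on version B (the rewrite author's own statement) =====
-- stated objective: faster
-- what changed: Replaces A's single indexed character scan with manual lookahead bookkeeping by a staged split-based algorithm: split the string on the letter H and score the first character of each piece after the first (an empty piece, i.e. an adjacent H or end of string, is worth 1, an uppercase first char 1, a digit its value).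
import Mathlib
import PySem

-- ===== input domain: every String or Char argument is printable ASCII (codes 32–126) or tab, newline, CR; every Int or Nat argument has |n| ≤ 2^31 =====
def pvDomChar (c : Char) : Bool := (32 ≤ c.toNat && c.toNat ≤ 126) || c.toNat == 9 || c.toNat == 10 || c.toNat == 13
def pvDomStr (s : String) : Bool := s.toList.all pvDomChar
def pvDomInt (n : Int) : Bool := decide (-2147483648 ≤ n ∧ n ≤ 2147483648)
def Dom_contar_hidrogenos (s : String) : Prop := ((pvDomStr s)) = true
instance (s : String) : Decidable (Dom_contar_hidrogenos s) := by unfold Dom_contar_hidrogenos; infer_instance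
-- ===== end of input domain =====

-- B replaces A's indexed character scan with lookahead bookkeeping by a staged split-based
-- algorithm (split on the letter H, score each following piece's first character);
-- objective: faster (a timing run measured B faster: C-level str.split vs a per-char Python loop).

-- ===== PORT A =====
-- literal transliteration of A: a fold over the characters carrying (contador_H, contador);
-- s[contador+1] is always in range when the loop body runs, so the .getD default is unreachable.
def contar_hidrogenos (s : String) : Int :=
  (s.toList.foldl (fun (st : Int × Int) char =>
      let contador_H := st.1
      let contador := st.2 + 1
      let contador := if contador + 1 = PySem.Str.len s then contador - 1 else contador
      let nxt := (PySem.Str.pyGet? s (contador + 1)).getD ' '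
      if char = 'H' ∧ PySem.Chars.isupper nxt then (contador_H + 1, contador)
      else if char = 'H' ∧ PySem.Chars.isdigit nxt then
        -- int(s[contador+1]): guarded by isdigit, so ofChars? succeeds; getD default unreachable
        (contador_H + (PySem.Int.ofChars? [nxt]).getD 0, contador)
      else (contador_H, contador))
    ((0 : Int), (-1 : Int))).1

-- ===== PORT B =====
-- s.split('H') with a nonempty separator always succeeds, so the .getD [] default is unreachable;
-- piece[0] on a nonempty piece is in range, so that .getD ' ' default is unreachable too.
def contar_hidrogenos_alt (s : String) : Int :=
  let parts := (PySem.Str.split? s "H").getD []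
  (PySem.List.slice parts (some 1) none).foldl
    (fun (total : Int) piece =>
      if piece = "" then total + 1
      else if PySem.Chars.isupper ((PySem.Str.pyGet? piece 0).getD ' ') then total + 1
      else if PySem.Chars.isdigit ((PySem.Str.pyGet? piece 0).getD ' ') then
        total + (PySem.Int.ofChars? [(PySem.Str.pyGet? piece 0).getD ' ']).getD 0
      else total) 0

-- ===== PRECONDITION & SPEC =====
def Spec_contar_hidrogenos (s : String) (out : Int) : Prop := out = contar_hidrogenos_alt s
instance (s : String) (out : Int) : Decidable (Spec_contar_hidrogenos s out) := by unfold Spec_contar_hidrogenos; infer_instance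

-- ===== CLAIM (what is proved, stated in full; the proofs are below) =====
def Claim_equal_contar_hidrogenos : Prop := ∀ (s : String), Dom_contar_hidrogenos s → Spec_contar_hidrogenos s (contar_hidrogenos s)

-- ===== LEMMAS AND PROOFS =====

-- value contributed by an H whose successor is b
def pvVal (b : Char) : Int :=
  if PySem.Chars.isupper b then 1
  else if PySem.Chars.isdigit b then (PySem.Int.ofChars? [b]).getD 0
  else 0

-- sum over a pair list of successor values of the H's (the common yardstick)
def pvPairSum (l : List (Char × Char)) : Int :=
  ((l.filter (fun p => p.1 = 'H')).map (fun p => pvVal p.2)).sum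

theorem pvPairSum_cons (p : Char × Char) (l : List (Char × Char)) :
    pvPairSum (p :: l) = (if p.1 = 'H' then pvVal p.2 else 0) + pvPairSum l := by
  by_cases h : p.1 = 'H' <;> simp [pvPairSum, h]

-- ---------- A's side: loop characterisation ----------

-- A's loop body as a named function of the string
def pvBody (s : String) (st : Int × Int) (char : Char) : Int × Int :=
  let contador_H := st.1
  let contador := st.2 + 1
  let contador := if contador + 1 = PySem.Str.len s then contador - 1 else contador
  let nxt := (PySem.Str.pyGet? s (contador + 1)).getD ' '
  if char = 'H' ∧ PySem.Chars.isupper nxt then (contador_H + 1, contador)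
  else if char = 'H' ∧ PySem.Chars.isdigit nxt then
    (contador_H + (PySem.Int.ofChars? [nxt]).getD 0, contador)
  else (contador_H, contador)

theorem pvBody_last (s : String) (acc : Int) (j : Nat) (hj : j + 1 = s.toList.length) :
    pvBody s (acc, (j : Int) - 1) (s.toList[j]'(by omega)) =
      (acc + (if s.toList[j]'(by omega) = 'H' then 1 else 0), (j : Int) - 1) := by
  have hcond : ((j : Int) - 1 + 1) + 1 = PySem.Str.len s := by
    simp [pysem, (by simpa using hj.symm : s.length = j + 1)]
  have hget : PySem.Str.pyGet? s (((j : Int) - 1 + 1) - 1 + 1) = some (s.toList[j]'(by omega)) := by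
    have h1 : (((j : Int) - 1 + 1) - 1 + 1) = ((j : Nat) : Int) := by ring
    rw [h1, PySem.Str.pyGet?_natCast]
    simp [List.getElem?_eq_getElem (by omega : j < s.toList.length)]
  simp only [pvBody]
  rw [if_pos hcond, hget]
  simp only [Option.getD_some]
  by_cases h : s.toList[j]'(by omega) = 'H'
  · simp [h, (by decide : PySem.Chars.isupper 'H' = true)]
  · simp [h]

theorem pvBody_mid (s : String) (acc : Int) (j : Nat) (hj : j + 1 < s.toList.length) :
    pvBody s (acc, (j : Int) - 1) (s.toList[j]'(by omega)) =
      (acc + (if s.toList[j]'(by omega) = 'H' then pvVal (s.toList[j + 1]'hj) else 0), (j : Int)) := by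
  have hcond : ¬ (((j : Int) - 1 + 1) + 1 = PySem.Str.len s) := by
    simp only [pysem]
    omega
  have hget : PySem.Str.pyGet? s (((j : Int) - 1 + 1) + 1) = some (s.toList[j + 1]'hj) := by
    have h1 : (((j : Int) - 1 + 1) + 1) = ((j + 1 : Nat) : Int) := by push_cast; ring
    rw [h1, PySem.Str.pyGet?_natCast]
    simp [List.getElem?_eq_getElem hj]
  have h0 : (j : Int) - 1 + 1 = (j : Int) := by ring
  simp only [pvBody]
  rw [if_neg hcond, hget]
  simp only [Option.getD_some, h0]
  by_cases h : s.toList[j]'(by omega) = 'H'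
  · simp only [h, true_and, pvVal]
    split_ifs <;> simp
  · simp [h]

-- the loop invariant: processing the suffix starting at position j with contador = j - 1
theorem pvLoop (s : String) :
    ∀ (k j : Nat) (acc : Int), s.toList.length - j = k → j ≤ s.toList.length →
      ((s.toList.drop j).foldl (pvBody s) (acc, (j : Int) - 1)).1
        = acc + pvPairSum ((s.toList.drop j).zip (s.toList.drop (j + 1)))
            + (if j < s.toList.length ∧ s.toList.getLast? = some 'H' then 1 else 0) := by
  intro k
  induction k with
  | zero =>
    intro j acc hk hj
    have hj' : j = s.toList.length := by omega
    have hd : s.toList.drop j = [] := List.drop_eq_nil_of_le (by omega)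
    have hd2 : s.toList.drop (j + 1) = [] := List.drop_eq_nil_of_le (by omega)
    rw [hd, hd2]
    simp [pvPairSum, hj']
  | succ k ih =>
    intro j acc hk hj
    have hjlt : j < s.toList.length := by omega
    have hdrop : s.toList.drop j = s.toList[j] :: s.toList.drop (j + 1) :=
      List.drop_eq_getElem_cons hjlt
    by_cases hlast : j + 1 = s.toList.length
    · -- last iteration: contador is decremented and the char looks at itself
      have hdropnil : s.toList.drop (j + 1) = [] := by simp [hlast]
      have hglast : s.toList.getLast? = some (s.toList[j]'hjlt) := by
        rw [List.getLast?_eq_getElem?, (by omega : s.toList.length - 1 = j),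
          List.getElem?_eq_getElem hjlt]
      rw [hdrop, hdropnil]
      simp only [List.foldl_cons, List.foldl_nil, List.zip_nil_right, pvPairSum, List.filter_nil,
        List.map_nil, List.sum_nil, pvBody_last s acc j hlast, hglast]
      by_cases h : s.toList[j]'hjlt = 'H' <;> simp [h, (by simpa using hjlt : j < s.length)]
    · -- middle iteration: the char looks at its successor
      have hj1 : j + 1 < s.toList.length := by omega
      have hdrop1 : s.toList.drop (j + 1) = s.toList[j + 1] :: s.toList.drop (j + 2) :=
        List.drop_eq_getElem_cons hj1
      rw [hdrop, List.foldl_cons, pvBody_mid s acc j hj1]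
      have hcast : (j : Int) = ((j + 1 : Nat) : Int) - 1 := by push_cast; ring
      rw [hcast, ih (j + 1) _ (by omega) (by omega)]
      have h12 : j + 1 + 1 = j + 2 := rfl
      rw [h12, hdrop1]
      simp only [List.zip_cons_cons, pvPairSum_cons]
      have hiff : (j + 1 < s.toList.length ∧ s.toList.getLast? = some 'H')
          ↔ (j < s.toList.length ∧ s.toList.getLast? = some 'H') := by
        constructor <;> (rintro ⟨_, h2⟩; exact ⟨by omega, h2⟩)
      rw [if_congr hiff rfl rfl]
      ring

-- ---------- B's side: split characterisation ----------

-- clean recursive model of splitting on 'H' with a pending prefix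
def pvSplit (pre : List Char) : List Char → List (List Char)
  | [] => [pre]
  | c :: rest => if c = 'H' then pre :: pvSplit [] rest else pvSplit (pre ++ [c]) rest

theorem pvSplit_go (l : List Char) :
    ∀ (fuel : Nat) (cur : List Char) (acc : List (List Char)), l.length < fuel →
      PySem.Chars.splitOn.go ['H'] fuel l cur acc = acc.reverse ++ pvSplit cur.reverse l := by
  induction l with
  | nil =>
    intro fuel cur acc hf
    match fuel, hf with
    | fuel + 1, _ => simp [PySem.Chars.splitOn.go, pvSplit]
  | cons c rest ih =>
    intro fuel cur acc hf
    match fuel, hf with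
    | fuel + 1, hf =>
      by_cases hc : c = 'H'
      · have hpre : List.isPrefixOf ['H'] (c :: rest) = true := by simp [List.isPrefixOf, hc]
        simp only [PySem.Chars.splitOn.go, hpre, if_pos]
        rw [(by simp : List.drop (['H'].length) (c :: rest) = rest),
          ih fuel [] (cur.reverse :: acc) (by simpa using hf)]
        simp [pvSplit, hc]
      · have hpre : List.isPrefixOf ['H'] (c :: rest) = false := by
          simp [List.isPrefixOf]
          exact fun h => hc h.symm
        simp only [PySem.Chars.splitOn.go, hpre, Bool.false_eq_true, if_false]
        rw [ih fuel (c :: cur) acc (by simpa using hf)]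
        simp [pvSplit, hc]

theorem pvSplitOn_eq (l : List Char) : PySem.Chars.splitOn l ['H'] = pvSplit [] l := by
  unfold PySem.Chars.splitOn
  rw [pvSplit_go l (l.length + 1) [] [] (by omega)]
  simp

-- the first piece absorbs the pending prefix; all later pieces are independent of it
theorem pvSplit_shift (l : List Char) :
    ∀ (pre : List Char), ∃ hd tl, pvSplit [] l = hd :: tl ∧ pvSplit pre l = (pre ++ hd) :: tl := by
  induction l with
  | nil => intro pre; exact ⟨[], [], rfl, by simp [pvSplit]⟩
  | cons c rest ih =>
    intro pre
    by_cases hc : c = 'H'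
    · exact ⟨[], pvSplit [] rest, by simp [pvSplit, hc], by simp [pvSplit, hc]⟩
    · obtain ⟨hd, tl, h1, h2⟩ := ih [c]
      obtain ⟨hd', tl', h1', h2'⟩ := ih (pre ++ [c])
      have : hd' = hd ∧ tl' = tl := by
        rw [h1] at h1'; exact ⟨(List.cons.injEq _ _ _ _ ▸ h1').1.symm, (List.cons.injEq _ _ _ _ ▸ h1').2.symm⟩
      refine ⟨c :: hd, tl, by simpa [pvSplit, hc] using h2, ?_⟩
      rw [this.1, this.2] at h2'
      simpa [pvSplit, hc] using h2'

-- value of one piece after an H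
def pvPieceVal (piece : List Char) : Int :=
  match piece with
  | [] => 1
  | c :: _ => pvVal c

-- total over the pieces after the first = A's pair sum plus the trailing-H bonus
theorem pvTailSum (l : List Char) :
    (((pvSplit [] l).tail).map pvPieceVal).sum
      = pvPairSum (l.zip (l.drop 1)) + (if l.getLast? = some 'H' then 1 else 0) := by
  induction l with
  | nil => simp [pvSplit, pvPairSum]
  | cons c rest ih =>
    by_cases hc : c = 'H'
    · -- an H: the next piece starts at the successor
      subst hc
      obtain ⟨hd, tl, h1, _⟩ := pvSplit_shift rest []
      have hL : (pvSplit [] ('H' :: rest)).tail = hd :: tl := by simp [pvSplit, h1]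
      have htl : (pvSplit [] rest).tail = tl := by rw [h1, List.tail_cons]
      rw [htl] at ih
      rw [hL]
      simp only [List.map_cons, List.sum_cons, ih]
      cases rest with
      | nil =>
        have hhd : hd = [] := by
          simpa [pvSplit] using congrArg (fun x => x.headI) h1.symm
        subst hhd
        simp [pvPieceVal, pvPairSum]
      | cons d r2 =>
        have hhd : pvPieceVal hd = pvVal d := by
          by_cases hd' : d = 'H'
          · have : hd = [] := by
              simpa [pvSplit, hd'] using congrArg (fun x => x.headI) h1.symm
            subst hd'; rw [this]; decide
          · obtain ⟨hd2, tl2, h12, h22⟩ := pvSplit_shift r2 [d]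
            have hstruct : pvSplit [] (d :: r2) = (d :: hd2) :: tl2 := by
              simpa [pvSplit, hd'] using h22
            rw [hstruct] at h1
            injection h1 with hh _
            rw [← hh]
            simp [pvPieceVal]
        rw [hhd]
        have hz : ('H' :: d :: r2).zip (List.drop 1 ('H' :: d :: r2))
            = ('H', d) :: ((d :: r2).zip (List.drop 1 (d :: r2))) := by simp
        rw [hz, pvPairSum_cons, List.getLast?_cons_cons]
        simp only [if_true]
        ring
    · -- not an H: this character only extends the first piece
      obtain ⟨hd, tl, h1, h2⟩ := pvSplit_shift rest [c]
      have hstep : (pvSplit [] (c :: rest)).tail = tl := by simp [pvSplit, hc, h2]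
      have htl : (pvSplit [] rest).tail = tl := by rw [h1, List.tail_cons]
      rw [hstep, ← htl, ih]
      cases rest with
      | nil => simp [pvPairSum, hc]
      | cons d r2 =>
        have hz : (c :: d :: r2).zip (List.drop 1 (c :: d :: r2))
            = (c, d) :: ((d :: r2).zip (List.drop 1 (d :: r2))) := by simp
        rw [hz, pvPairSum_cons, List.getLast?_cons_cons]
        simp [hc]

-- B's fold body over a String piece computes pvPieceVal of its character list
theorem pvBodyB_eq (total : Int) (piece : List Char) :
    (if String.ofList piece = "" then total + 1
     else if PySem.Chars.isupper ((PySem.Str.pyGet? (String.ofList piece) 0).getD ' ') then total + 1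
     else if PySem.Chars.isdigit ((PySem.Str.pyGet? (String.ofList piece) 0).getD ' ') then
       total + (PySem.Int.ofChars? [(PySem.Str.pyGet? (String.ofList piece) 0).getD ' ']).getD 0
     else total) = total + pvPieceVal piece := by
  cases piece with
  | nil => simp [pvPieceVal]
  | cons c r =>
    have hne : String.ofList (c :: r) ≠ "" := by
      intro h
      have := congrArg String.toList h
      simp at this
    have hget : (PySem.Str.pyGet? (String.ofList (c :: r)) 0).getD ' ' = c := by
      simp [PySem.Str.pyGet?, PySem.List.pyGet?, PySem.List.pyIdx?]
    rw [if_neg hne, hget]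
    simp only [pvPieceVal, pvVal]
    split_ifs <;> ring

-- ===== VERDICT (by name: the statement is the Claim_ definition above) =====
theorem contar_hidrogenos_spec : Claim_equal_contar_hidrogenos := by
  intro s _
  unfold Spec_contar_hidrogenos
  -- A's side
  have hA := pvLoop s s.toList.length 0 0 (by omega) (by omega)
  simp only [List.drop_zero, Nat.cast_zero, zero_sub, zero_add] at hA
  have heq : contar_hidrogenos s = (s.toList.foldl (pvBody s) ((0 : Int), (-1 : Int))).1 := rfl
  rw [heq, hA]
  -- B's side
  have hsplit : (PySem.Str.split? s "H").getD []
      = (PySem.Chars.splitOn s.toList ['H']).map String.ofList := by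
    simp [PySem.Str.split?, PySem.Chars.split?]
  have halt : contar_hidrogenos_alt s
      = ((((pvSplit [] s.toList).tail).map String.ofList).foldl
          (fun (total : Int) piece =>
            if piece = "" then total + 1
            else if PySem.Chars.isupper ((PySem.Str.pyGet? piece 0).getD ' ') then total + 1
            else if PySem.Chars.isdigit ((PySem.Str.pyGet? piece 0).getD ' ') then
              total + (PySem.Int.ofChars? [(PySem.Str.pyGet? piece 0).getD ' ']).getD 0
            else total) 0) := by
    show ((PySem.List.slice ((PySem.Str.split? s "H").getD []) (some 1) none).foldl _ 0) = _
    rw [hsplit, PySem.List.slice_from _ (by norm_num : (0:Int) ≤ 1), pvSplitOn_eq]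
    simp [List.drop_one, List.map_tail]
  rw [halt]
  have hfold : ∀ (pieces : List (List Char)) (a : Int),
      ((pieces.map String.ofList).foldl
        (fun (total : Int) piece =>
          if piece = "" then total + 1
          else if PySem.Chars.isupper ((PySem.Str.pyGet? piece 0).getD ' ') then total + 1
          else if PySem.Chars.isdigit ((PySem.Str.pyGet? piece 0).getD ' ') then
            total + (PySem.Int.ofChars? [(PySem.Str.pyGet? piece 0).getD ' ']).getD 0
          else total) a) = a + (pieces.map pvPieceVal).sum := by
    intro pieces
    induction pieces with
    | nil => intro a; simp
    | cons p ps ihp =>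
      intro a
      simp only [List.map_cons, List.foldl_cons, pvBodyB_eq a p, List.sum_cons, ihp]
      ring
  rw [hfold, pvTailSum, zero_add]
  by_cases hend : s.toList.getLast? = some 'H'
  · have hne : 0 < s.toList.length := by
      cases hl : s.toList with
      | nil => rw [hl] at hend; simp at hend
      | cons a l => simp
    rw [if_pos ⟨hne, hend⟩, if_pos hend]
  · rw [if_neg (fun h => hend h.2), if_neg hend]
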